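-- pv_equiv track=rewrite | github.com/senapk/tko | src/tko/util/rtext.py | _combine_styles
-- ===== SOURCE A (Python) =====
-- FG = set("krgybmcw")
--
-- BG = set("KRGYBMCW")
--
-- ATTR = set("*_/~!")
--
-- def _combine_styles(base: str, overlay: str) -> str:
--     fg = None
--     bg = None
--     attr: set[str] = set()
--
--     for c in base:
--         if c in FG:
--             fg = c
--         elif c in BG:
--             bg = c
--         elif c in ATTR:
--             attr.add(c)
--
--     for c in overlay:
--         if c in FG:
--             fg = c
--         elif c in BG:
--             bg = c
--         elif c in ATTR:
--             attr.add(c)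
--
--     result = ""
--     if fg:
--         result += fg
--     if bg:
--         result += bg
--     if attr:
--         result += "".join(sorted(attr))
--     return result
-- ===== SOURCE B (Python) =====
-- FG = set("krgybmcw")
--
-- BG = set("KRGYBMCW")
--
-- ATTR = set("*_/~!")
--
-- def _combine_styles(base: str, overlay: str) -> str:
--     combined = base + overlay
--     fg = next((c for c in reversed(combined) if c in FG), None)
--     bg = next((c for c in reversed(combined) if c in BG), None)
--     attr = set(combined) & ATTR
--     return (fg or "") + (bg or "") + "".join(sorted(attr))
-- ===== Notes on version B (the rewrite author's own statement) =====
-- stated objective: simpler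
-- what changed: Replaces the two stateful classification loops (mutable fg/bg/attr updated per character) with three independent declarative queries over base+overlay: a reversed search for the last fg code, one for the last bg code, and a set intersection for the attributes.
import Mathlib
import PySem

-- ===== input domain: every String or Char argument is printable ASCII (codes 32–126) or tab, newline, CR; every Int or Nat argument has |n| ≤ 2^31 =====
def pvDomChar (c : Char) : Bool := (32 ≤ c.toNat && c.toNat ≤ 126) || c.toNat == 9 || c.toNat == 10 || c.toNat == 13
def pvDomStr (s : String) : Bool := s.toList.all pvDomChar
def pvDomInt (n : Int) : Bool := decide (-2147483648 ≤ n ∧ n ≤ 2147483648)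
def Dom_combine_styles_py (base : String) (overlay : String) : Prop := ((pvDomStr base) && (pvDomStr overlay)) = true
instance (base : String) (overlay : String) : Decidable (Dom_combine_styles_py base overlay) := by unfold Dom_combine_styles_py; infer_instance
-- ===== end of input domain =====

-- B replaces A's two stateful classification loops by three independent queries
-- (reversed find for fg/bg, set intersection for attrs); objective: simpler.

-- module constants (shared by both Pythons)
def pvFG : PySem.Set Char := PySem.Set.ofList "krgybmcw".toList
def pvBG : PySem.Set Char := PySem.Set.ofList "KRGYBMCW".toList
def pvATTR : PySem.Set Char := PySem.Set.ofList "*_/~!".toList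

-- ===== PORT A =====
-- one iteration of A's classification loop over state (fg, bg, attr)
def pvStepA (st : Option Char × Option Char × PySem.Set Char) (c : Char) :
    Option Char × Option Char × PySem.Set Char :=
  if pvFG.contains c then (some c, st.2.1, st.2.2)
  else if pvBG.contains c then (st.1, some c, st.2.2)
  else if pvATTR.contains c then (st.1, st.2.1, st.2.2.add c)
  else st

def combine_styles_py (base : String) (overlay : String) : String :=
  let st1 := base.toList.foldl pvStepA (none, none, PySem.Set.empty)
  let st2 := overlay.toList.foldl pvStepA st1
  let result : String := ""
  let result := match st2.1 with | some c => result ++ String.singleton c | none => result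
  let result := match st2.2.1 with | some c => result ++ String.singleton c | none => result
  let result := if st2.2.2.isEmpty then result
                else result ++ String.mk (PySem.List.sorted st2.2.2 (fun x => x) false)
  result

-- ===== PORT B =====
def combine_styles_py_alt (base : String) (overlay : String) : String :=
  let combined := (base ++ overlay).toList
  let fg := combined.reverse.find? (fun c => pvFG.contains c)
  let bg := combined.reverse.find? (fun c => pvBG.contains c)
  let attr := PySem.Set.inter (PySem.Set.ofList combined) pvATTR
  (fg.elim "" String.singleton) ++ (bg.elim "" String.singleton) ++
    String.mk (PySem.List.sorted attr (fun x => x) false)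

-- ===== PRECONDITION & SPEC =====
def Spec_combine_styles_py (base : String) (overlay : String) (out : String) : Prop := out = combine_styles_py_alt base overlay
instance (base : String) (overlay : String) (out : String) : Decidable (Spec_combine_styles_py base overlay out) := by unfold Spec_combine_styles_py; infer_instance

-- ===== CLAIM (what is proved, stated in full; the proofs are below) =====
def Claim_equal_combine_styles_py : Prop := ∀ (base : String) (overlay : String), Dom_combine_styles_py base overlay → Spec_combine_styles_py base overlay (combine_styles_py base overlay)

-- ===== LEMMAS AND PROOFS =====

-- the three style alphabets are pairwise disjoint
lemma pv_fg_not_bg (c : Char) (h : pvFG.contains c = true) : c ∉ pvBG := by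
  simp [pvFG, PySem.Set.contains] at h
  rcases h with rfl|rfl|rfl|rfl|rfl|rfl|rfl|rfl <;> decide

lemma pv_fg_not_attr (c : Char) (h : pvFG.contains c = true) : c ∉ pvATTR := by
  simp [pvFG, PySem.Set.contains] at h
  rcases h with rfl|rfl|rfl|rfl|rfl|rfl|rfl|rfl <;> decide

lemma pv_bg_not_attr (c : Char) (h : pvBG.contains c = true) : c ∉ pvATTR := by
  simp [pvBG, PySem.Set.contains] at h
  rcases h with rfl|rfl|rfl|rfl|rfl|rfl|rfl|rfl <;> decide

-- one step of A's loop, written componentwise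
lemma pv_step_eq (f b : Option Char) (a : PySem.Set Char) (c : Char) :
    pvStepA (f, b, a) c =
      ((if pvFG.contains c then some c else none).or f,
       (if pvBG.contains c then some c else none).or b,
       if pvATTR.contains c then a.add c else a) := by
  unfold pvStepA
  by_cases hF : pvFG.contains c = true
  · rw [if_pos hF, if_pos hF, if_neg (by simp [PySem.Set.contains, pv_fg_not_bg c hF]),
      if_neg (by simp [PySem.Set.contains, pv_fg_not_attr c hF])]
    rfl
  · rw [if_neg hF, if_neg hF]
    by_cases hB : pvBG.contains c = true
    · rw [if_pos hB, if_pos hB, if_neg (by simp [PySem.Set.contains, pv_bg_not_attr c hB])]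
      rfl
    · rw [if_neg hB, if_neg hB]
      by_cases hA : pvATTR.contains c = true
      · rw [if_pos hA, if_pos hA]; rfl
      · rw [if_neg hA, if_neg hA]; rfl

-- characterisation of A's loop: fg/bg are the last matching char, attr a fold over the filter
lemma pv_foldA (l : List Char) (f b : Option Char) (a : PySem.Set Char) :
    l.foldl pvStepA (f, b, a) =
      ((l.reverse.find? (fun c => pvFG.contains c)).or f,
       (l.reverse.find? (fun c => pvBG.contains c)).or b,
       (l.filter (fun c => pvATTR.contains c)).foldl PySem.Set.add a) := by
  induction l generalizing f b a with
  | nil => rfl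
  | cons c l ih =>
    rw [List.foldl_cons, pv_step_eq, ih, List.reverse_cons]
    refine Prod.ext ?_ (Prod.ext ?_ ?_)
    · simp only [List.find?_append, Option.or_assoc]
      rw [show (List.find? (fun c => pvFG.contains c) [c]) =
        (if pvFG.contains c then some c else none) by cases hc : pvFG.contains c <;> simp [PySem.Set.contains] at hc <;> simp [List.find?, hc]]
    · simp only [List.find?_append, Option.or_assoc]
      rw [show (List.find? (fun c => pvBG.contains c) [c]) =
        (if pvBG.contains c then some c else none) by cases hc : pvBG.contains c <;> simp [PySem.Set.contains] at hc <;> simp [List.find?, hc]]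
    · rw [List.filter_cons]
      by_cases hA : pvATTR.contains c = true
      · rw [if_pos hA]; simp only [hA, if_pos, List.foldl_cons]
      · rw [if_neg hA]; simp only [hA, if_neg, Bool.false_eq_true]
        simp [hA]

-- A's attribute set and B's are permutations of one another
lemma pv_attr_perm (l : List Char) :
    ((l.filter (fun c => pvATTR.contains c)).foldl PySem.Set.add PySem.Set.empty).Perm
      (PySem.Set.inter (PySem.Set.ofList l) pvATTR) := by
  have h1 : (l.filter (fun c => pvATTR.contains c)).foldl PySem.Set.add PySem.Set.empty
      = PySem.Set.ofList (l.filter (fun c => pvATTR.contains c)) := rfl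
  rw [h1, PySem.Set.inter]
  refine (List.perm_ext_iff_of_nodup (PySem.Set.nodup_ofList _)
    ((PySem.Set.nodup_ofList l).filter _)).mpr ?_
  intro x
  simp [PySem.Set.mem_ofList, List.mem_filter, PySem.Set.contains, and_comm]

-- sorted attribute strings coincide
lemma pv_attr_sorted (l : List Char) :
    PySem.List.sorted ((l.filter (fun c => pvATTR.contains c)).foldl PySem.Set.add PySem.Set.empty)
        (fun x => x) false
      = PySem.List.sorted (PySem.Set.inter (PySem.Set.ofList l) pvATTR) (fun x => x) false :=
  PySem.List.sorted_eq_sorted_of_perm _ _ _ (fun _ _ h => h) (pv_attr_perm l)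

-- ===== VERDICT (by name: the statement is the Claim_ definition above) =====
theorem combine_styles_py_spec : Claim_equal_combine_styles_py := by
  intro base overlay _
  unfold Spec_combine_styles_py combine_styles_py combine_styles_py_alt
  simp only [← List.foldl_append, pv_foldA, Option.or_none, String.toList_append,
    List.reverse_append, List.find?_append]
  have h1 := pv_attr_sorted (base.toList ++ overlay.toList)
  simp only [List.filter_append] at h1
  rw [← h1]
  by_cases h : (List.foldl PySem.Set.add PySem.Set.empty
      (List.filter (fun c => pvATTR.contains c) base.toList ++
        List.filter (fun c => pvATTR.contains c) overlay.toList)).isEmpty = true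
  · rw [if_pos h, List.isEmpty_iff.mp h]
    split <;> rename_i hb <;> split <;> rename_i hf <;> rw [hf, hb] <;>
      simp [PySem.List.sorted, String.singleton, show String.mk ([] : List Char) = "" from rfl]
  · rw [if_neg h]
    split <;> rename_i hb <;> split <;> rename_i hf <;> rw [hf, hb] <;>
      simp [String.singleton]
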